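-- pv_equiv track=rewrite | github.com/Enjef/Algo | 1500 - 1599/1560 - Most Visited Sector in a Circular Track/1560 - Most Visited Sector in a Circular Track.py | mostVisited_best_mmeory
-- ===== SOURCE A (Python) =====
-- from typing import List
--
-- def mostVisited_best_mmeory(n: int, rounds: List[int]) -> List[int]:
--     s, e = rounds[0], rounds[-1]
--     res = []
--     while e != s:
--         res.append(e)
--         e -= 1
--         if e == 0:
--             e = n
--     res.append(s)
--     return sorted(res)
-- ===== SOURCE B (Python) =====
-- def mostVisited_best_mmeory(n, rounds):
--     s, e = rounds[0], rounds[-1]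
--     if s <= e:
--         return list(range(s, e + 1))
--     return list(range(1, e + 1)) + list(range(s, n + 1))
-- ===== Notes on version B (the rewrite author's own statement) =====
-- stated objective: simpler
-- what changed: B replaces A's step-by-step backward walk around the track followed by a sort with a direct closed-form construction of the answer as one or two ascending ranges.
-- outside the precondition, e.g. on mostVisited_best_mmeory(-1, [-1, 5]): A returns [-1, 1, 2, 3, 4, 5], B returns [-1, 0, 1, 2, 3, 4, 5]
import Mathlib
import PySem

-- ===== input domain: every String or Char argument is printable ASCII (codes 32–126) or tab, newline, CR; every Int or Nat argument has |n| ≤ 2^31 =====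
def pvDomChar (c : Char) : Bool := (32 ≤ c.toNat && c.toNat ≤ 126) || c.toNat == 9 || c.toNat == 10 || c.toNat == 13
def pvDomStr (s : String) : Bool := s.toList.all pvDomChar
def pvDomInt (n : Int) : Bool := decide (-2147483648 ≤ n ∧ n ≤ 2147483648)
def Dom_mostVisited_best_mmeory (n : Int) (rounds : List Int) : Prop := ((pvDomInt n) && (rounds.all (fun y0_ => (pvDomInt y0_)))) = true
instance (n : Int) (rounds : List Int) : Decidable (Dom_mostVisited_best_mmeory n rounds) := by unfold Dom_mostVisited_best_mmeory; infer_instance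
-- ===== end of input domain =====

-- B builds the sorted answer directly as one or two ascending ranges instead of walking the
-- track backwards sector by sector and sorting the collected list (objective: simpler).


-- ===== PORT A =====
-- the while loop of A, made total with a fuel counter; under Pre_ the fuel chosen in
-- mostVisited_best_mmeory strictly exceeds the number of iterations, so the fuel-exhaustion
-- branch is never taken there
def pvLoopA (n s : Int) : Nat → Int → List Int → List Int
  | 0, _, res => res ++ [s]
  | fuel + 1, e, res =>
    if e = s then res ++ [s]
    else
      let e' := e - 1
      pvLoopA n s fuel (if e' = 0 then n else e') (res ++ [e])

def mostVisited_best_mmeory (n : Int) (rounds : List Int) : List Int :=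
  let s := rounds.headD 0        -- rounds[0];  IndexError on [] is excluded by Pre_
  let e := rounds.getLastD 0     -- rounds[-1]
  PySem.List.sorted (pvLoopA n s ((e - s).toNat + e.toNat + (n - s).toNat + 1) e []) (fun x => x) false

-- ===== PORT B =====
def mostVisited_best_mmeory_alt (n : Int) (rounds : List Int) : List Int :=
  let s := rounds.headD 0
  let e := rounds.getLastD 0
  if s ≤ e then PySem.List.pyRange s (e + 1) 1
  else PySem.List.pyRange 1 (e + 1) 1 ++ PySem.List.pyRange s (n + 1) 1

-- ===== PRECONDITION & SPEC =====
-- Pre_ excludes the empty list (A raises IndexError), the inputs on which A's while loop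
-- never terminates, and inputs whose start/end sector labels lie outside 1..n yet A still
-- terminates by passing through the 0→n wrap — such labels are outside the problem's domain
-- of sectors 1..n and the set of sectors A collects there is an artefact of the wrap;
-- Pre_ covers the whole natural domain 1 ≤ rounds[0], rounds[-1] ≤ n.
def Pre_mostVisited_best_mmeory (n : Int) (rounds : List Int) : Prop :=
  rounds ≠ [] ∧
  (let s := rounds.headD 0
   let e := rounds.getLastD 0
   s = e ∨ (s < e ∧ (1 ≤ s ∨ e ≤ 0)) ∨ (e < s ∧ 1 ≤ e ∧ 1 ≤ s ∧ s ≤ n))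
instance (n : Int) (rounds : List Int) : Decidable (Pre_mostVisited_best_mmeory n rounds) := by
  unfold Pre_mostVisited_best_mmeory; infer_instance

def pvWitness_mostVisited_best_mmeory : Int × List Int := (4, [1, 3])

def Spec_mostVisited_best_mmeory (n : Int) (rounds : List Int) (out : List Int) : Prop := out = mostVisited_best_mmeory_alt n rounds
instance (n : Int) (rounds : List Int) (out : List Int) : Decidable (Spec_mostVisited_best_mmeory n rounds out) := by unfold Spec_mostVisited_best_mmeory; infer_instance

-- ===== CLAIM (what is proved, stated in full; the proofs are below) =====
def Claim_equal_mostVisited_best_mmeory : Prop := ∀ (n : Int) (rounds : List Int), Dom_mostVisited_best_mmeory n rounds → Pre_mostVisited_best_mmeory n rounds → Spec_mostVisited_best_mmeory n rounds (mostVisited_best_mmeory n rounds)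

-- ===== LEMMAS AND PROOFS =====

-- direct descent: from s+k down to s, never touching 0 after a decrement
theorem pvLoopA_desc (n s : Int) (k : Nat) : ∀ (fuel : Nat) (res : List Int),
    k ≤ fuel → (1 ≤ s ∨ s + k ≤ 0) →
    pvLoopA n s fuel (s + k) res = res ++ (PySem.List.pyRange s (s + k + 1) 1).reverse := by
  induction k with
  | zero =>
    intro fuel res _ _
    cases fuel with
    | zero => simp [pvLoopA, PySem.List.pyRange_one_singleton]
    | succ f => simp [pvLoopA, PySem.List.pyRange_one_singleton]
  | succ k ih =>
    intro fuel res hf h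
    obtain ⟨f, rfl⟩ : ∃ f, fuel = f + 1 := ⟨fuel - 1, by omega⟩
    push_cast at h ⊢
    rw [show s + ((k : ℤ) + 1) = s + (k : ℤ) + 1 from by ring]
    have hne : s + (k : ℤ) + 1 ≠ s := by omega
    have hz' : s + (k : ℤ) ≠ 0 := by omega
    have hIf : (if s + (k : ℤ) + 1 - 1 = 0 then n else s + (k : ℤ) + 1 - 1) = s + (k : ℤ) := by
      rw [show s + (k : ℤ) + 1 - 1 = s + (k : ℤ) from by ring, if_neg hz']
    have ihr := ih f (res ++ [s + (k : ℤ) + 1]) (by omega) (by omega)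
    have hsplit : PySem.List.pyRange s (s + (k : ℤ) + 1 + 1) 1
        = PySem.List.pyRange s (s + (k : ℤ) + 1) 1 ++ [s + (k : ℤ) + 1] :=
      PySem.List.pyRange_one_succ_right (by omega)
    rw [pvLoopA, if_neg hne]
    simp only []
    rw [hIf, ihr, hsplit]
    simp [List.reverse_append, List.append_assoc]

-- wrap phase: from k+1 down to 1, then jump to n (target s is above, never hit)
theorem pvLoopA_wrap (n s : Int) (k : Nat) : ∀ (fuel : Nat) (res : List Int),
    (k : Int) + 1 < s →
    pvLoopA n s (fuel + (k + 1)) ((k : Int) + 1) res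
      = pvLoopA n s fuel n (res ++ (PySem.List.pyRange 1 ((k : Int) + 2) 1).reverse) := by
  induction k with
  | zero =>
    intro fuel res hs
    have hne : (1 : Int) ≠ s := by omega
    simp only [Nat.cast_zero, zero_add]
    rw [show fuel + (0 + 1) = fuel + 1 from by omega, pvLoopA, if_neg hne]
    norm_num
    rw [show ((2:ℤ) = 1 + 1) from by ring, PySem.List.pyRange_one_singleton 1]
    simp
  | succ k ih =>
    intro fuel res hs
    push_cast at hs ⊢
    have hne : (k : ℤ) + 1 + 1 ≠ s := by omega
    have hIf : (if (k : ℤ) + 1 + 1 - 1 = 0 then n else (k : ℤ) + 1 + 1 - 1) = (k : ℤ) + 1 := by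
      rw [show (k : ℤ) + 1 + 1 - 1 = (k : ℤ) + 1 from by ring, if_neg (by omega)]
    have hsplit : PySem.List.pyRange 1 ((k : ℤ) + 1 + 2) 1
        = PySem.List.pyRange 1 ((k : ℤ) + 2) 1 ++ [(k : ℤ) + 2] := by
      have h := PySem.List.pyRange_one_succ_right (a := 1) (b := (k : ℤ) + 2) (by omega)
      rw [show (k : ℤ) + 1 + 2 = (k : ℤ) + 2 + 1 from by ring, h]
    rw [show fuel + (k + 1 + 1) = (fuel + (k + 1)) + 1 from by omega, pvLoopA, if_neg hne]
    simp only []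
    rw [hIf]
    have ihr := ih fuel (res ++ [(k : ℤ) + 1 + 1]) (by omega)
    rw [ihr, hsplit]
    simp [List.reverse_append, List.append_assoc]
    ring_nf

-- wrap phase restated for an arbitrary starting sector e (1 ≤ e < s)
theorem pvLoopA_wrap' (n s e : Int) (he1 : 1 ≤ e) (hs : e < s) (fuel : Nat) (res : List Int) :
    pvLoopA n s (fuel + e.toNat) e res
      = pvLoopA n s fuel n (res ++ (PySem.List.pyRange 1 (e + 1) 1).reverse) := by
  obtain ⟨k, rfl⟩ : ∃ k : Nat, e = (k : ℤ) + 1 := ⟨(e - 1).toNat, by omega⟩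
  rw [show ((k : ℤ) + 1).toNat = k + 1 from by omega,
      show (k : ℤ) + 1 + 1 = (k : ℤ) + 2 from by ring]
  exact pvLoopA_wrap n s k fuel res hs

theorem pyRange_pairwise_lt (a b : Int) : (PySem.List.pyRange a b 1).Pairwise (· < ·) :=
  PySem.List.pairwise_lt_pyRange_one a b

-- sorted of a reversed ascending range is the range itself
theorem sorted_reverse_range (a b : Int) :
    PySem.List.sorted ((PySem.List.pyRange a b 1).reverse) (fun x => x) false
      = PySem.List.pyRange a b 1 :=
  PySem.List.sorted_eq_of_perm_of_pairwise_lt _ _ _ (List.reverse_perm _).symm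
    (pyRange_pairwise_lt a b)

theorem sorted_reverse_range_two (a b c d : Int) (h : b ≤ c) :
    PySem.List.sorted ((PySem.List.pyRange a b 1).reverse ++ (PySem.List.pyRange c d 1).reverse)
      (fun x => x) false
      = PySem.List.pyRange a b 1 ++ PySem.List.pyRange c d 1 := by
  apply PySem.List.sorted_eq_of_perm_of_pairwise_lt
  · exact List.Perm.append (List.reverse_perm _).symm (List.reverse_perm _).symm
  · rw [List.pairwise_append]
    refine ⟨pyRange_pairwise_lt a b, pyRange_pairwise_lt c d, ?_⟩
    intro x hx y hy
    rw [PySem.List.mem_pyRange_one] at hx hy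
    omega

-- the whole computation of A, as a function of n, s = rounds[0], e = rounds[-1]
theorem pvMain_core (n s e : Int)
    (h : s = e ∨ (s < e ∧ (1 ≤ s ∨ e ≤ 0)) ∨ (e < s ∧ 1 ≤ e ∧ 1 ≤ s ∧ s ≤ n)) :
    PySem.List.sorted (pvLoopA n s ((e - s).toNat + e.toNat + (n - s).toNat + 1) e []) (fun x => x) false
      = if s ≤ e then PySem.List.pyRange s (e + 1) 1
        else PySem.List.pyRange 1 (e + 1) 1 ++ PySem.List.pyRange s (n + 1) 1 := by
  by_cases hle : s ≤ e
  · rw [if_pos hle]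
    have hk : e = s + ((e - s).toNat : ℤ) := by omega
    have hcond : 1 ≤ s ∨ s + ((e - s).toNat : ℤ) ≤ 0 := by omega
    have hd := pvLoopA_desc n s (e - s).toNat ((e - s).toNat + e.toNat + (n - s).toNat + 1) []
      (by omega) hcond
    rw [← hk] at hd
    rw [hd, List.nil_append, sorted_reverse_range]
  · rw [if_neg hle]
    obtain ⟨hlt, he1, hs1, hsn⟩ : e < s ∧ 1 ≤ e ∧ 1 ≤ s ∧ s ≤ n := by
      rcases h with h | ⟨h, -⟩ | h
      · omega
      · omega
      · exact h
    rw [show (e - s).toNat + e.toNat + (n - s).toNat + 1 = ((n - s).toNat + 1) + e.toNat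
          from by omega,
        pvLoopA_wrap' n s e he1 hlt ((n - s).toNat + 1) []]
    have hn : n = s + ((n - s).toNat : ℤ) := by omega
    have hd := pvLoopA_desc n s (n - s).toNat ((n - s).toNat + 1)
      ([] ++ (PySem.List.pyRange 1 (e + 1) 1).reverse) (by omega) (by omega)
    rw [← hn] at hd
    rw [hd, List.nil_append]
    exact sorted_reverse_range_two 1 (e + 1) s (n + 1) (by omega)

-- ===== VERDICT (by name: the statement is the Claim_ definition above) =====
theorem mostVisited_best_mmeory_spec : Claim_equal_mostVisited_best_mmeory := by
  intro n rounds _ hpre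
  obtain ⟨-, hcase⟩ := hpre
  exact pvMain_core n (rounds.headD 0) (rounds.getLastD 0) hcase
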